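-- pv_equiv track=rewrite | github.com/brandonhippe/Advent-of-Code-2016 | python/18.py | part2
-- ===== SOURCE A (Python) =====
-- def part2(data):
--     """ 2016 Day 18 Part 2
--     """
--
--     first = '.' + data[0] + '.'
--
--     safe = len([t for t in first if t == '.']) - 2
--     pRow = first
--
--     for _ in range(1, 400000):
--         rowText = ''
--         for i in range(1, len(first) - 1):
--             if pRow[i-1:i+2] in TILE_RULES:
--                 rowText += '^'
--             else:
--                 rowText += '.'
--                 safe += 1
--
--         pRow = '.' + rowText + '.'
--
--     return safe
--
-- TILE_RULES = {'^^.', '.^^', '^..', '..^'}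
-- ===== SOURCE B (Python) =====
-- def part2(data):
--     """ 2016 Day 18 Part 2 """
--     first = data[0]
--     width = len(first)
--     mask = (1 << width) - 1
--
--     row = 0
--     bit = 1
--     for c in first:
--         if c == '^':
--             row += bit
--         bit <<= 1
--
--     safe = width - row.bit_count()
--     for _ in range(399999):
--         row = ((row << 1) ^ (row >> 1)) & mask
--         safe += width - row.bit_count()
--     return safe
-- ===== Notes on version B (the rewrite author's own statement) =====
-- stated objective: faster
-- what changed: Each row is an integer bitmask (bit i = trap); the per-character inner loop with string slicing and set membership is replaced by one whole-row bit operation ((row<<1)^(row>>1))&mask per generation, counting safe tiles with int.bit_count().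
-- outside the precondition, e.g. on part2(['x']): A returns 399999, B returns 400000
import Mathlib
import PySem

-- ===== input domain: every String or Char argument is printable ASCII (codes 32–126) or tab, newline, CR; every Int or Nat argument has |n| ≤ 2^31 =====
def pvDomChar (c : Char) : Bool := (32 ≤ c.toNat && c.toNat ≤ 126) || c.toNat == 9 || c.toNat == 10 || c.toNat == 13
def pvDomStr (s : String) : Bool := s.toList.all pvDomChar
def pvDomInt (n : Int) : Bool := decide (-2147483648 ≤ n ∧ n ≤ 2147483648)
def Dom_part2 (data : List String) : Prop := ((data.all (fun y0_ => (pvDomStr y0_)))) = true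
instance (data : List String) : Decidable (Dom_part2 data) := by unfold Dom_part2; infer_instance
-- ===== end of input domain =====

-- B replaces A's per-character string-slice/set-membership inner loop by one whole-row
-- bitmask update ((row<<1)^(row>>1))&mask per generation (objective: faster, constant-factor).

-- ===== PORT A =====
def pvTileRules : List (List Char) := [['^','^','.'], ['.','^','^'], ['^','.','.'], ['.','.','^']]

def part2 (data : List String) : Int :=
  match PySem.List.pyGet? data 0 with
  | none => 0  -- data[0] raises IndexError; excluded by Pre_part2
  | some s0 =>
    let first : List Char := ['.'] ++ s0.toList ++ ['.']
    let safe0 : Int := ((first.filter (fun t => t == '.')).length : Int) - 2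
    let st := (PySem.List.pyRange 1 400000 1).foldl (fun (st : List Char × Int) _ =>
      let inner := (PySem.List.pyRange 1 ((first.length : Int) - 1) 1).foldl
        (fun (st2 : List Char × Int) i =>
          if PySem.List.slice st.1 (some (i - 1)) (some (i + 2)) ∈ pvTileRules then
            (st2.1 ++ ['^'], st2.2)
          else
            (st2.1 ++ ['.'], st2.2 + 1))
        ([], st.2)
      (['.'] ++ inner.1 ++ ['.'], inner.2)) (first, safe0)
    st.2

-- ===== PORT B =====
def part2_alt (data : List String) : Int :=
  match PySem.List.pyGet? data 0 with
  | none => 0  -- data[0] raises IndexError; excluded by Pre_part2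
  | some s0 =>
    let first := s0.toList
    let width := first.length
    let mask : Nat := (1 <<< width) - 1
    let rb := first.foldl (fun (rb : Nat × Nat) c =>
        (if c = '^' then rb.1 + rb.2 else rb.1, rb.2 <<< 1)) (0, 1)
    let safe0 : Int := (width : Int) - (PySem.Int.bitCount ((rb.1 : Nat) : Int) : Int)
    let st := (List.range 399999).foldl (fun (st : Nat × Int) _ =>
        let row := ((st.1 <<< 1) ^^^ (st.1 >>> 1)) &&& mask
        (row, st.2 + ((width : Int) - (PySem.Int.bitCount ((row : Nat) : Int) : Int)))) (rb.1, safe0)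
    st.2

-- ===== PRECONDITION & SPEC =====
-- Pre_ restricts to the puzzle's natural domain: a nonempty input whose first line is a row
-- of '.'/'^' tiles only. It excludes data = [] (A raises IndexError there) and, as a stated
-- narrowing, first lines with other characters, which A's slice-in-set test silently treats
-- as safe neighbours (an accident of the encoding that B's bitmask does not reproduce).
def Pre_part2 (data : List String) : Prop :=
  data ≠ [] ∧ ((data.headD "").toList.all (fun c => c == '.' || c == '^')) = true
instance (data : List String) : Decidable (Pre_part2 data) := by unfold Pre_part2; infer_instance

def pvWitness_part2 : List String := [".^"]

def Spec_part2 (data : List String) (out : Int) : Prop := out = part2_alt data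
instance (data : List String) (out : Int) : Decidable (Spec_part2 data out) := by unfold Spec_part2; infer_instance

-- ===== CLAIM (what is proved, stated in full; the proofs are below) =====
def Claim_equal_part2 : Prop := ∀ (data : List String), Dom_part2 data → Pre_part2 data → Spec_part2 data (part2 data)

-- ===== LEMMAS AND PROOFS =====

def encL : List Char → Nat
  | [] => 0
  | c :: cs => (if c = '^' then 1 else 0) + 2 * encL cs

theorem tb_enc (p : List Char) (i : Nat) : (encL p).testBit i = decide (p.getD i '.' = '^') := by
  induction p generalizing i with
  | nil => simp [encL]
  | cons c cs ih =>
    cases i with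
    | zero =>
      rw [Nat.testBit_zero]
      by_cases h : c = '^' <;> simp [encL, h] <;> omega
    | succ i =>
      rw [Nat.testBit_add_one]
      have h2 : ((if c = '^' then 1 else 0) + 2 * encL cs) / 2 = encL cs := by
        by_cases h : c = '^' <;> simp [h] <;> omega
      simp [encL, h2, ih]

theorem bc_two_mul (b e : Nat) (hb : b < 2) :
    PySem.Int.bitCount ((b + 2 * e : Nat) : Int) = b + PySem.Int.bitCount ((e : Nat) : Int) := by
  by_cases h : b + 2 * e = 0
  · have hb0 : b = 0 := by omega
    have he0 : e = 0 := by omega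
    simp [hb0, he0, PySem.Int.bitCount_zero]
  · rw [PySem.Int.bitCount_natCast (m := b + 2 * e) (by omega)]
    have h1 : (b + 2 * e) % 2 = b := by omega
    have h2 : (b + 2 * e) / 2 = e := by omega
    rw [h1, h2]

theorem bc_enc (p : List Char) : PySem.Int.bitCount ((encL p : Nat) : Int) = p.count '^' := by
  induction p with
  | nil => simp [encL, PySem.Int.bitCount_zero]
  | cons c cs ih =>
    show PySem.Int.bitCount (((if c = '^' then 1 else 0) + 2 * encL cs : Nat) : Int) = _
    rw [bc_two_mul _ _ (by split <;> omega), ih]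
    by_cases h : c = '^' <;> simp [h, List.count_cons] <;> omega

def pvPad (p : List Char) : List Char := '.' :: (p ++ ['.'])

def pvTrap (p : List Char) (j : Nat) : Bool :=
  decide (((pvPad p).drop j).take 3 ∈ pvTileRules)

def pvStep (p : List Char) : List Char :=
  (List.range p.length).map (fun j => if pvTrap p j then '^' else '.')

-- the three characters of window j, for j < p.length
theorem window_eq (p : List Char) (j : Nat) (hj : j < p.length) :
    ((pvPad p).drop j).take 3 = [(pvPad p).getD j '.', (pvPad p).getD (j+1) '.', (pvPad p).getD (j+2) '.'] := by
  have hl : (pvPad p).length = p.length + 2 := by simp [pvPad]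
  have h1 : j < (pvPad p).length := by omega
  have h2 : j + 1 < (pvPad p).length := by omega
  have h3 : j + 1 + 1 < (pvPad p).length := by omega
  rw [List.drop_eq_getElem_cons h1, List.drop_eq_getElem_cons h2, List.drop_eq_getElem_cons h3,
      List.getD_eq_getElem _ _ h1, List.getD_eq_getElem _ _ h2,
      List.getD_eq_getElem _ _ (by omega : j + 2 < (pvPad p).length)]
  simp only [List.take_succ_cons, List.take_zero]

theorem pad_getD_succ (p : List Char) (k : Nat) (hk : k < p.length + 1) :
    (pvPad p).getD (k + 1) '.' = p.getD k '.' := by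
  simp only [pvPad, List.getD_cons_succ]
  rcases Nat.lt_or_ge k p.length with h | h
  · rw [List.getD_eq_getElem _ _ (by simp; omega), List.getD_eq_getElem _ _ h]
    simp [List.getElem_append_left h]
  · have hk' : k = p.length := by omega
    subst hk'
    simp [List.getD_eq_getElem _ _ (by simp : p.length < (p ++ ['.']).length),
          List.getD_eq_default _ _ (by omega)]

theorem mem_pad (p : List Char) (h : ∀ c ∈ p, c = '.' ∨ c = '^') (k : Nat) :
    (pvPad p).getD k '.' = '.' ∨ (pvPad p).getD k '.' = '^' := by
  rcases Nat.lt_or_ge k (pvPad p).length with hk | hk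
  · rw [List.getD_eq_getElem _ _ hk]
    have hmem : (pvPad p)[k] ∈ pvPad p := List.getElem_mem hk
    simp only [pvPad, List.mem_cons, List.mem_append, List.mem_singleton] at hmem
    rcases hmem with h1 | h1 | h1 | h1
    · left; exact h1
    · exact h _ h1
    · left; exact h1
    · simp at h1
  · rw [List.getD_eq_default _ _ hk]; left; rfl

-- trap rule = (left tile is a trap) xor (right tile is a trap)
theorem trap_iff (p : List Char) (h : ∀ c ∈ p, c = '.' ∨ c = '^') (j : Nat) (hj : j < p.length) :
    pvTrap p j
      = ((decide ((pvPad p).getD j '.' = '^')).xor (decide ((pvPad p).getD (j+2) '.' = '^'))) := by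
  simp only [pvTrap, window_eq p j hj]
  rcases mem_pad p h j with hl | hl <;> rcases mem_pad p h (j+1) with hc | hc <;>
    rcases mem_pad p h (j+2) with hr | hr <;> rw [hl, hc, hr] <;> decide

theorem enc_step (p : List Char) (h : ∀ c ∈ p, c = '.' ∨ c = '^') :
    encL (pvStep p) = ((encL p <<< 1) ^^^ (encL p >>> 1)) &&& ((1 <<< p.length) - 1) := by
  apply Nat.eq_of_testBit_eq
  intro i
  rw [Nat.one_shiftLeft, Nat.testBit_and, Nat.testBit_two_pow_sub_one, Nat.testBit_xor,
      Nat.testBit_shiftLeft, Nat.testBit_shiftRight, tb_enc, tb_enc, tb_enc]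
  rcases Nat.lt_or_ge i p.length with hi | hi
  · have hstep : (pvStep p).getD i '.' = if pvTrap p i then '^' else '.' := by
      rw [pvStep, List.getD_eq_getElem _ _ (by simp [pvStep]; omega)]
      simp
    have hx : decide ((if pvTrap p i then '^' else '.') = '^') = pvTrap p i := by
      cases ht : pvTrap p i <;> simp [ht]
    rw [hstep, hx, trap_iff p h i hi]
    have hleft : decide ((pvPad p).getD i '.' = '^')
        = (decide (1 ≤ i) && decide (p.getD (i - 1) '.' = '^')) := by
      cases i with
      | zero => simp [pvPad]
      | succ k => rw [pad_getD_succ _ _ (by omega)]; simp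
    have hright : decide ((pvPad p).getD (i+2) '.' = '^') = decide (p.getD (1+i) '.' = '^') := by
      rw [(by omega : i + 2 = (i + 1) + 1), pad_getD_succ _ _ (by omega), Nat.add_comm 1 i]
    rw [hleft, hright]
    simp [hi]
  · have hlen : (pvStep p).length = p.length := by simp [pvStep]
    rw [List.getD_eq_default _ _ (by omega)]
    have hfalse : decide (i < p.length) = false := by simp; omega
    simp [hfalse]

-- A's inner loop: append-'^'-or-'.'-and-count fold, characterized
theorem innerA_eq (P : Int → Prop) [DecidablePred P] (l : List Int) (acc : List Char) (s : Int) :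
    l.foldl (fun (st2 : List Char × Int) i =>
        if P i then (st2.1 ++ ['^'], st2.2) else (st2.1 ++ ['.'], st2.2 + 1)) (acc, s)
      = (acc ++ l.map (fun i => if P i then '^' else '.'),
         s + (l.countP (fun i => !decide (P i)) : Int)) := by
  induction l generalizing acc s with
  | nil => simp
  | cons i t ih =>
    by_cases h : P i <;> simp [h, ih, List.countP_cons] <;> ring

-- B's row-building loop
theorem rowfold (cs : List Char) (r b : Nat) :
    cs.foldl (fun (rb : Nat × Nat) c =>
        (if c = '^' then rb.1 + rb.2 else rb.1, rb.2 <<< 1)) (r, b)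
      = (r + b * encL cs, b * 2 ^ cs.length) := by
  induction cs generalizing r b with
  | nil => simp [encL]
  | cons c t ih =>
    rw [List.foldl_cons, ih]
    have hb : b <<< 1 = b * 2 := by rw [Nat.shiftLeft_eq, pow_one]
    rw [hb]
    simp only [encL, List.length_cons, Prod.mk.injEq, pow_succ]
    by_cases h : c = '^' <;> simp [h] <;> constructor <;> first | ring | trivial

theorem count_split (d : List Char) (h : ∀ c ∈ d, c = '.' ∨ c = '^') :
    d.count '.' + d.count '^' = d.length := by
  induction d with
  | nil => simp
  | cons c t ih =>
    have hc := h c (by simp)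
    have ht := ih (fun x hx => h x (by simp [hx]))
    rcases hc with rfl | rfl <;> simp [List.count_cons] <;> omega

-- two loops that ignore their loop variable, run in lockstep
theorem foldl_rel {α β σ τ : Type} (R : σ → τ → Prop) (fA : σ → σ) (fB : τ → τ)
    (hstep : ∀ s t, R s t → R (fA s) (fB t)) :
    ∀ (la : List α) (lb : List β), la.length = lb.length → ∀ s t, R s t →
      R (la.foldl (fun s _ => fA s) s) (lb.foldl (fun t _ => fB t) t) := by
  intro la
  induction la with
  | nil => intro lb hl s t hR; cases lb <;> simp_all
  | cons a ta ih =>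
    intro lb hl s t hR
    cases lb with
    | nil => simp at hl
    | cons b tb => exact ih tb (by simpa using hl) _ _ (hstep _ _ hR)

theorem slice_window (p : List Char) (k : Nat) :
    PySem.List.slice (pvPad p) (some (1 + (k : Int) - 1)) (some (1 + (k : Int) + 2))
      = ((pvPad p).drop k).take 3 := by
  rw [(by push_cast; ring : (1 + (k : Int) - 1) = ((k : Nat) : Int)),
      (by push_cast; ring : (1 + (k : Int) + 2) = ((k + 3 : Nat) : Int)),
      PySem.List.slice_natCast]
  simp

def pvRel (w : Nat) (sA : List Char × Int) (sB : Nat × Int) : Prop :=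
  ∃ p : List Char, p.length = w ∧ (∀ c ∈ p, c = '.' ∨ c = '^') ∧
    sA.1 = pvPad p ∧ sB.1 = encL p ∧ sA.2 = sB.2

theorem step_rel (w : Nat) (sA : List Char × Int) (sB : Nat × Int) (h : pvRel w sA sB) :
    pvRel w
      (('.' :: ((PySem.List.pyRange 1 (((w + 2 : Nat) : Int) - 1) 1).foldl
          (fun (st2 : List Char × Int) i =>
            if PySem.List.slice sA.1 (some (i - 1)) (some (i + 2)) ∈ pvTileRules then
              (st2.1 ++ ['^'], st2.2)
            else (st2.1 ++ ['.'], st2.2 + 1)) ([], sA.2)).1 ++ ['.'],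
        ((PySem.List.pyRange 1 (((w + 2 : Nat) : Int) - 1) 1).foldl
          (fun (st2 : List Char × Int) i =>
            if PySem.List.slice sA.1 (some (i - 1)) (some (i + 2)) ∈ pvTileRules then
              (st2.1 ++ ['^'], st2.2)
            else (st2.1 ++ ['.'], st2.2 + 1)) ([], sA.2)).2))
      ((((sB.1 <<< 1) ^^^ (sB.1 >>> 1)) &&& ((1 <<< w) - 1),
        sB.2 + ((w : Int) - (PySem.Int.bitCount (((((sB.1 <<< 1) ^^^ (sB.1 >>> 1)) &&& ((1 <<< w) - 1) : Nat)) : Int) : Int)))) := by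
  obtain ⟨p, hlen, hgood, hA1, hB1, hs⟩ := h
  have hrange : PySem.List.pyRange 1 (((w + 2 : Nat) : Int) - 1) 1
      = (List.range w).map (fun (k : Nat) => 1 + (k : Int)) := by
    rw [PySem.List.pyRange_one]
    have hn : ((((w + 2 : Nat) : Int) - 1) - 1).toNat = w := by push_cast; omega
    rw [hn]
  rw [hA1, hrange,
      innerA_eq (fun i => PySem.List.slice (pvPad p) (some (i - 1)) (some (i + 2)) ∈ pvTileRules),
      List.map_map, List.countP_map]
  have hmap : (List.range w).map ((fun i =>
        if PySem.List.slice (pvPad p) (some (i - 1)) (some (i + 2)) ∈ pvTileRules then '^' else '.')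
        ∘ fun (k : Nat) => 1 + (k : Int)) = pvStep p := by
    rw [pvStep, hlen]
    apply List.map_eq_map_iff.mpr
    intro k _
    rw [Function.comp_apply, slice_window]
    by_cases hm : ((pvPad p).drop k).take 3 ∈ pvTileRules <;> simp [pvTrap, hm]
  have hcount : (List.range w).countP ((fun i =>
        !decide (PySem.List.slice (pvPad p) (some (i - 1)) (some (i + 2)) ∈ pvTileRules))
        ∘ fun (k : Nat) => 1 + (k : Int))
      = (List.range w).countP (fun k => !pvTrap p k) := by
    apply List.countP_congr
    intro k _
    rw [Function.comp_apply, slice_window]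
    by_cases hm : ((pvPad p).drop k).take 3 ∈ pvTileRules <;> simp [pvTrap, hm]
  rw [hmap, hcount]
  have henc : ((sB.1 <<< 1) ^^^ (sB.1 >>> 1)) &&& ((1 <<< w) - 1) = encL (pvStep p) := by
    rw [hB1, ← hlen, enc_step p hgood]
  have hT : (pvStep p).count '^' = (List.range w).countP (fun k => pvTrap p k) := by
    rw [List.count_eq_countP, pvStep, hlen, List.countP_map]
    apply List.countP_congr
    intro k _
    cases ht : pvTrap p k <;> simp [ht]
  have hsplit : w = (List.range w).countP (fun k => pvTrap p k)
      + (List.range w).countP (fun k => !pvTrap p k) := by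
    have := List.length_eq_countP_add_countP (l := List.range w) (fun k => pvTrap p k)
    simpa using this
  rw [henc]
  refine ⟨pvStep p, by simp [pvStep, hlen], ?_, by simp [pvPad], rfl, ?_⟩
  · intro c hc
    simp only [pvStep, List.mem_map] at hc
    obtain ⟨j, _, hj⟩ := hc
    cases ht : pvTrap p j <;> simp [ht] at hj <;> subst hj <;> simp
  · show sA.2 + ((List.range w).countP (fun k => !pvTrap p k) : Int)
        = sB.2 + ((w : Int) - (PySem.Int.bitCount ((encL (pvStep p) : Nat) : Int) : Int))
    rw [bc_enc, hT, hs]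
    omega

theorem pv_cons_eq (s0 : String) (rest : List String)
    (la : List Int) (lb : List Nat) (hlen : la.length = lb.length)
    (hch' : ∀ c ∈ s0.toList, c = '.' ∨ c = '^') :
    (match PySem.List.pyGet? (s0 :: rest) 0 with
     | none => (0 : Int)
     | some s0 =>
       let first : List Char := ['.'] ++ s0.toList ++ ['.']
       let safe0 : Int := ((first.filter (fun t => t == '.')).length : Int) - 2
       let st := la.foldl (fun (st : List Char × Int) _ =>
         let inner := (PySem.List.pyRange 1 ((first.length : Int) - 1) 1).foldl
           (fun (st2 : List Char × Int) i =>
             if PySem.List.slice st.1 (some (i - 1)) (some (i + 2)) ∈ pvTileRules then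
               (st2.1 ++ ['^'], st2.2)
             else
               (st2.1 ++ ['.'], st2.2 + 1))
           ([], st.2)
         (['.'] ++ inner.1 ++ ['.'], inner.2)) (first, safe0)
       st.2)
    = (match PySem.List.pyGet? (s0 :: rest) 0 with
       | none => (0 : Int)
       | some s0 =>
         let first := s0.toList
         let width := first.length
         let mask : Nat := (1 <<< width) - 1
         let rb := first.foldl (fun (rb : Nat × Nat) c =>
             (if c = '^' then rb.1 + rb.2 else rb.1, rb.2 <<< 1)) (0, 1)
         let safe0 : Int := (width : Int) - (PySem.Int.bitCount ((rb.1 : Nat) : Int) : Int)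
         let st := lb.foldl (fun (st : Nat × Int) _ =>
             let row := ((st.1 <<< 1) ^^^ (st.1 >>> 1)) &&& mask
             (row, st.2 + ((width : Int) - (PySem.Int.bitCount ((row : Nat) : Int) : Int)))) (rb.1, safe0)
         st.2) := by
  have h0 : PySem.List.pyGet? (s0 :: rest) 0 = some s0 := PySem.List.pyGet?_zero_cons s0 rest
  simp only [h0]
  have hrow0 : s0.toList.foldl (fun (rb : Nat × Nat) c =>
      (if c = '^' then rb.1 + rb.2 else rb.1, rb.2 <<< 1)) (0, 1)
      = (encL s0.toList, 2 ^ s0.toList.length) := by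
    rw [rowfold]; simp
  have hfl : (['.'] ++ s0.toList ++ ['.'] : List Char).length = s0.toList.length + 2 := by
    simp
  simp only [hrow0, hfl]
  have hsafe0 : (((['.'] ++ s0.toList ++ ['.'] : List Char).filter (fun t => t == '.')).length : Int) - 2
      = (s0.toList.length : Int) - (PySem.Int.bitCount ((encL s0.toList : Nat) : Int) : Int) := by
    rw [bc_enc]
    have h1 : ((['.'] ++ s0.toList ++ ['.'] : List Char).filter (fun t => t == '.')).length
        = s0.toList.count '.' + 2 := by
      rw [← List.countP_eq_length_filter]
      simp [List.countP_append, ← List.count_eq_countP]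
    have h2 := count_split s0.toList hch'
    have h3 : s0.toList.count '^' ≤ s0.toList.length := List.count_le_length
    rw [h1]
    omega
  have hR0 : pvRel s0.toList.length
      (['.'] ++ s0.toList ++ ['.'],
        (((['.'] ++ s0.toList ++ ['.'] : List Char).filter (fun t => t == '.')).length : Int) - 2)
      (encL s0.toList,
        (s0.toList.length : Int) - (PySem.Int.bitCount ((encL s0.toList : Nat) : Int) : Int)) :=
    ⟨s0.toList, rfl, hch', rfl, rfl, hsafe0⟩
  obtain ⟨p, _, _, _, _, h2⟩ :=
    foldl_rel (pvRel s0.toList.length) _ _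
      (fun sA sB h => step_rel s0.toList.length sA sB h) la lb hlen _ _ hR0
  exact h2


theorem part2_eq_alt (data : List String) (hpre : Pre_part2 data) :
    part2 data = part2_alt data := by
  obtain ⟨hne, hch⟩ := hpre
  cases data with
  | nil => exact absurd rfl hne
  | cons s0 rest =>
    have hch' : ∀ c ∈ s0.toList, c = '.' ∨ c = '^' := by simpa using hch
    exact pv_cons_eq s0 rest (PySem.List.pyRange 1 400000 1) (List.range 399999)
      (by rw [PySem.List.length_pyRange_one, List.length_range]; rfl) hch'

-- ===== VERDICT (by name: the statement is the Claim_ definition above) =====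
theorem part2_spec : Claim_equal_part2 := by
  intro data _ hpre
  show part2 data = part2_alt data
  exact part2_eq_alt data hpre
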